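-- pv_equiv track=rewrite | github.com/subediaayush/code-katana | lv091223/python/amz/routebuilding.py | getServedBuilding
-- ===== SOURCE A (Python) =====
-- def getServedBuilding(buildingCount, routerLocation, routerRange):
--
--     routerReach = [0] * len(buildingCount)
--
--     for routerIndex in range(len(routerLocation)):
--         currentRange = routerRange[routerIndex]
--         routerPosition = routerLocation[routerIndex]
--
--         routerStartReach = routerPosition - currentRange
--         routerEndReach = routerPosition + currentRange
--         start = max(1, routerStartReach)
--         end = min(len(buildingCount), routerEndReach)
--
--         for i in range(start - 1, end):
--             routerReach[i] += 1
--
--     reachedBuildings = 0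
--     for buildingIndex in range(len(buildingCount)):
--         if (buildingCount[buildingIndex] <= routerReach[buildingIndex]):
--             reachedBuildings += 1
--
--     return reachedBuildings
-- ===== SOURCE B (Python) =====
-- def getServedBuilding(buildingCount, routerLocation, routerRange):
--     # alternative: count, per building, the routers that cover it (|pos - building| <= range)
--     # instead of incrementing a reach array cell-by-cell per router.
--     routers = list(zip(routerLocation, routerRange))
--     served = 0
--     for i, need in enumerate(buildingCount):
--         covered = sum(1 for pos, r in routers if abs(pos - (i + 1)) <= r)
--         if need <= covered:
--             served += 1
--     return served
-- ===== Notes on version B (the rewrite author's own statement) =====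
-- stated objective: alternative
-- what changed: B drops A's mutable reach array and its per-cell range increments: it zips locations with ranges once and, for each building, directly counts the routers whose interval covers it via |pos-(i+1)| <= range.
import Mathlib
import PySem

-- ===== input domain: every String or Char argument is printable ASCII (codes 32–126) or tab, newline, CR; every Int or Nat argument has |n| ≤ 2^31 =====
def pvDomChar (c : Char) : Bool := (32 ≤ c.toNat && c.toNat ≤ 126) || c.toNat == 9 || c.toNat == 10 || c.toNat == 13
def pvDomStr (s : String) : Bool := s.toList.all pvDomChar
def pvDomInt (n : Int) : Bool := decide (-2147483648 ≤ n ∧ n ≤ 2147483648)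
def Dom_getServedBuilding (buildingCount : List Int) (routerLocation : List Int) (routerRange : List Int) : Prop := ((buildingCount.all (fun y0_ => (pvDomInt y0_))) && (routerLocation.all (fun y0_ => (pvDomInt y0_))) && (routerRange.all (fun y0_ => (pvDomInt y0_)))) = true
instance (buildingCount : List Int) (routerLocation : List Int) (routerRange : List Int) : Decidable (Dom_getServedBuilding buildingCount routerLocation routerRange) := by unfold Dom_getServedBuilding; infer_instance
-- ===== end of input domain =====

-- B replaces A's mutable reach array (incremented cell by cell per router) by a direct
-- per-building count of covering routers over the zipped (location, range) pairs;
-- objective: alternative (different traversal, similar cost).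

-- ===== PORT A =====
-- literal transliteration of A; the inner `routerReach[i] += 1` indices are always
-- in range (start ≥ 1, end ≤ len(buildingCount)), so pyGetD/pySetD are exact there
def getServedBuilding (buildingCount : List Int) (routerLocation : List Int) (routerRange : List Int) : Int :=
  let n : Int := (buildingCount.length : Int)
  let reach0 : List Int := List.replicate buildingCount.length 0
  let reach := (PySem.List.pyRange 0 (routerLocation.length : Int) 1).foldl (fun reach ri =>
    let currentRange := PySem.List.pyGetD routerRange ri 0
    let routerPosition := PySem.List.pyGetD routerLocation ri 0
    let start := max 1 (routerPosition - currentRange)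
    let e := min n (routerPosition + currentRange)
    (PySem.List.pyRange (start - 1) e 1).foldl
      (fun v i => PySem.List.pySetD v i (PySem.List.pyGetD v i 0 + 1)) reach) reach0
  (PySem.List.pyRange 0 n 1).foldl
    (fun acc bi => if PySem.List.pyGetD buildingCount bi 0 ≤ PySem.List.pyGetD reach bi 0
                   then acc + 1 else acc) 0

-- ===== PORT B =====
-- covered = sum(1 for pos, r in routers if abs(pos - (i + 1)) <= r)
def pvCover (routers : List (Int × Int)) (pos : Int) : Int :=
  routers.foldl (fun acc pr => if |pr.1 - pos| ≤ pr.2 then acc + 1 else acc) 0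

def getServedBuilding_alt (buildingCount : List Int) (routerLocation : List Int) (routerRange : List Int) : Int :=
  let routers := routerLocation.zip routerRange
  (PySem.List.enumerate buildingCount 0).foldl
    (fun served pr => if pr.2 ≤ pvCover routers (pr.1 + 1) then served + 1 else served) 0

-- ===== PRECONDITION & SPEC =====
-- A raises IndexError on routerRange[routerIndex] exactly when routerRange is shorter
-- than routerLocation; only those inputs are excluded.
def Pre_getServedBuilding (buildingCount : List Int) (routerLocation : List Int) (routerRange : List Int) : Prop :=
  routerLocation.length ≤ routerRange.length
instance (buildingCount : List Int) (routerLocation : List Int) (routerRange : List Int) : Decidable (Pre_getServedBuilding buildingCount routerLocation routerRange) := by unfold Pre_getServedBuilding; infer_instance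

def pvWitness_getServedBuilding : List Int × List Int × List Int := ([2, 1, 0], [2], [1])

def Spec_getServedBuilding (buildingCount : List Int) (routerLocation : List Int) (routerRange : List Int) (out : Int) : Prop := out = getServedBuilding_alt buildingCount routerLocation routerRange
instance (buildingCount : List Int) (routerLocation : List Int) (routerRange : List Int) (out : Int) : Decidable (Spec_getServedBuilding buildingCount routerLocation routerRange out) := by unfold Spec_getServedBuilding; infer_instance

-- ===== CLAIM (what is proved, stated in full; the proofs are below) =====
def Claim_equal_getServedBuilding : Prop := ∀ (buildingCount : List Int) (routerLocation : List Int) (routerRange : List Int), Dom_getServedBuilding buildingCount routerLocation routerRange → Pre_getServedBuilding buildingCount routerLocation routerRange → Spec_getServedBuilding buildingCount routerLocation routerRange (getServedBuilding buildingCount routerLocation routerRange)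

-- ===== LEMMAS AND PROOFS =====

-- A's inner loop `for i in range(a, b): routerReach[i] += 1`
def pvBump (v : List Int) (a b : Int) : List Int :=
  (PySem.List.pyRange a b 1).foldl
    (fun v i => PySem.List.pySetD v i (PySem.List.pyGetD v i 0 + 1)) v

-- A's router loop after k routers, with the per-router locals zeta-reduced
def pvReach (bc loc rng : List Int) (k : Nat) : List Int :=
  (PySem.List.pyRange 0 (k : Int) 1).foldl (fun reach ri =>
    let currentRange := PySem.List.pyGetD rng ri 0
    let routerPosition := PySem.List.pyGetD loc ri 0
    pvBump reach (max 1 (routerPosition - currentRange) - 1)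
                 (min (bc.length : Int) (routerPosition + currentRange)))
    (List.replicate bc.length 0)

lemma pvBump_spec (a b : Int) (ha : 0 ≤ a) :
    ∀ (v : List Int),
      (pvBump v a b).length = v.length ∧
      ∀ j : Nat, j < v.length →
        PySem.List.pyGetD (pvBump v a b) (j : Int) 0 =
          PySem.List.pyGetD v (j : Int) 0 + (if a ≤ (j : Int) ∧ (j : Int) < b then 1 else 0) := by
  by_cases hab : b ≤ a
  · intro v
    unfold pvBump
    rw [PySem.List.pyRange_one_eq_nil hab]
    simp only [List.foldl_nil]
    refine ⟨by trivial, fun j hj => ?_⟩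
    have hc : ¬ (a ≤ (j:Int) ∧ (j:Int) < b) := by omega
    simp [hc]
  · push_neg at hab
    obtain ⟨k, hkeq⟩ : ∃ k : Nat, (b - a).toNat = k := ⟨_, rfl⟩
    induction k generalizing a with
    | zero => omega
    | succ k ih =>
      intro v
      unfold pvBump
      rw [PySem.List.pyRange_one_cons hab]
      simp only [List.foldl_cons]
      set v' := PySem.List.pySetD v a (PySem.List.pyGetD v a 0 + 1) with hv'
      have hset : v' = v.set a.toNat (PySem.List.pyGetD v a 0 + 1) :=
        PySem.List.pySetD_of_nonneg v _ ha
      have hlenv' : v'.length = v.length := by rw [hset]; simp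
      have hget' : ∀ j : Nat, j < v.length →
          PySem.List.pyGetD v' (j:Int) 0 =
            PySem.List.pyGetD v (j:Int) 0 + (if (j:Int) = a then 1 else 0) := by
        intro j hj
        rw [hset]
        by_cases hja : (j:Int) = a
        · have hja' : a.toNat = j := by omega
          simp only [PySem.List.pyGetD_natCast]
          rw [List.getD_eq_getElem _ _ (by simpa using hj), hja']
          rw [List.getElem_set_self (by simpa using hj)]
          rw [List.getD_eq_getElem _ _ hj]
          rw [← hja, PySem.List.pyGetD_natCast, List.getD_eq_getElem _ _ hj]
          simp
        · simp only [PySem.List.pyGetD_natCast]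
          rw [List.getD_eq_getElem _ _ (by simpa using hj),
              List.getD_eq_getElem _ _ hj,
              List.getElem_set_ne (by omega)]
          simp [hja]
      by_cases hb : a + 1 < b
      · have hrec := ih (a+1) (by omega) hb (by omega) v'
        unfold pvBump at hrec
        refine ⟨hrec.1.trans hlenv', fun j hj => ?_⟩
        rw [hrec.2 j (by omega), hget' j hj]
        split_ifs <;> omega
      · have hba : b ≤ a + 1 := by omega
        rw [PySem.List.pyRange_one_eq_nil hba]
        simp only [List.foldl_nil]
        refine ⟨hlenv', fun j hj => ?_⟩
        rw [hget' j hj]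
        split_ifs <;> omega

lemma pvCover_append_singleton (xs : List (Int × Int)) (pr : Int × Int) (pos : Int) :
    pvCover (xs ++ [pr]) pos = pvCover xs pos + (if |pr.1 - pos| ≤ pr.2 then 1 else 0) := by
  unfold pvCover
  rw [List.foldl_append]
  simp only [List.foldl_cons, List.foldl_nil]
  split_ifs <;> ring

lemma pvReach_spec (bc loc rng : List Int) (hlen : loc.length ≤ rng.length) :
    ∀ (k : Nat), k ≤ loc.length →
      (pvReach bc loc rng k).length = bc.length ∧
      ∀ j : Nat, j < bc.length →
        PySem.List.pyGetD (pvReach bc loc rng k) (j : Int) 0 =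
          pvCover ((loc.zip rng).take k) ((j : Int) + 1) := by
  intro k
  induction k with
  | zero =>
    intro _
    unfold pvReach
    rw [PySem.List.pyRange_one_eq_nil (by norm_num)]
    simp only [List.foldl_nil]
    refine ⟨by simp, fun j hj => ?_⟩
    simp [pvCover, PySem.List.pyGetD_natCast, hj]
  | succ k ih =>
    intro hk
    have hk' : k ≤ loc.length := by omega
    obtain ⟨ihlen, ihget⟩ := ih hk'
    have hstep : pvReach bc loc rng (k+1) =
        pvBump (pvReach bc loc rng k)
          (max 1 (PySem.List.pyGetD loc (k : Int) 0 - PySem.List.pyGetD rng (k : Int) 0) - 1)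
          (min (bc.length : Int) (PySem.List.pyGetD loc (k : Int) 0 + PySem.List.pyGetD rng (k : Int) 0)) := by
      unfold pvReach
      have hcast : ((k+1 : Nat) : Int) = (k : Int) + 1 := by push_cast; ring
      rw [hcast, PySem.List.pyRange_one_succ_right (by positivity), List.foldl_append]
      simp only [List.foldl_cons, List.foldl_nil]
    have hZ : (loc.zip rng).length = loc.length := by
      rw [List.length_zip]; omega
    have hkZ : k < (loc.zip rng).length := by omega
    have htake : (loc.zip rng).take (k+1) = (loc.zip rng).take k ++ [(loc.zip rng)[k]] := by
      rw [List.take_add_one]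
      congr 1
      rw [List.getElem?_eq_getElem hkZ]
      rfl
    set p := PySem.List.pyGetD loc (k : Int) 0 with hp
    set r := PySem.List.pyGetD rng (k : Int) 0 with hr
    have hzk : (loc.zip rng)[k] = (p, r) := by
      rw [List.getElem_zip]
      have h1 : p = loc[k] := by
        rw [hp, PySem.List.pyGetD_natCast, List.getD_eq_getElem _ _ (by omega)]
        try rfl
      have h2 : r = rng[k] := by
        rw [hr, PySem.List.pyGetD_natCast, List.getD_eq_getElem _ _ (by omega)]
      rw [h1, h2]
      try rfl
    have ha : (0:Int) ≤ max 1 (p - r) - 1 := by omega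
    obtain ⟨blen, bget⟩ := pvBump_spec (max 1 (p - r) - 1) (min (bc.length : Int) (p + r)) ha (pvReach bc loc rng k)
    refine ⟨by rw [hstep]; rw [blen, ihlen], fun j hj => ?_⟩
    rw [hstep, bget j (by omega), ihget j hj, htake, hzk, pvCover_append_singleton]
    congr 1
    have habs : |p - ((j:Int)+1)| ≤ r ↔ -r ≤ p - ((j:Int)+1) ∧ p - ((j:Int)+1) ≤ r := abs_le
    have hjb : (j : Int) < (bc.length : Int) := by exact_mod_cast hj
    split_ifs with h1 h2 h2 <;> simp_all <;> omega

theorem getServedBuilding_eq (bc loc rng : List Int)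
    (h : loc.length ≤ rng.length) :
    getServedBuilding bc loc rng = getServedBuilding_alt bc loc rng := by
  obtain ⟨hlen, hget⟩ := pvReach_spec bc loc rng h loc.length le_rfl
  have hA : getServedBuilding bc loc rng =
      (PySem.List.pyRange 0 (bc.length : Int) 1).foldl
        (fun acc bi => if PySem.List.pyGetD bc bi 0 ≤ PySem.List.pyGetD (pvReach bc loc rng loc.length) bi 0
                       then acc + 1 else acc) 0 := rfl
  have hB : getServedBuilding_alt bc loc rng =
      (PySem.List.enumerate bc 0).foldl
        (fun served pr => if pr.2 ≤ pvCover (loc.zip rng) (pr.1 + 1) then served + 1 else served) 0 := rfl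
  rw [hA, hB, PySem.List.enumerate_eq_map_pyRange bc 0, List.foldl_map]
  simp only [PySem.List.len_eq]
  apply PySem.List.foldl_congr_mem
  intro acc x hx
  rw [PySem.List.mem_pyRange_one] at hx
  obtain ⟨hx0, hxn⟩ := hx
  have hxj : x = (x.toNat : Int) := by omega
  have hjlt : x.toNat < bc.length := by omega
  rw [hxj, hget x.toNat hjlt,
      List.take_of_length_le (by rw [List.length_zip]; omega)]

-- ===== VERDICT (by name: the statement is the Claim_ definition above) =====
theorem getServedBuilding_spec : Claim_equal_getServedBuilding := by
  intro bc loc rng _ hpre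
  exact getServedBuilding_eq bc loc rng hpre
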